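-- pv_equiv track=rewrite | github.com/swjiae/Steady-Study | 이은혁/algorithm/BOJ/[BOJ 2628] 종이자르기.py | maxrange
-- ===== SOURCE A (Python) =====
-- def sortarr(arr):
--     # 삽입정렬
--     for i in range(len(arr)):
--         for j in range(i, 0, -1):
--             if arr[j] < arr[j-1]:
--                 arr[j], arr[j-1] = arr[j-1], arr[j]
--     return arr
--
-- def maxrange(arr):
--     arr = sortarr(arr)
--     max_val = 0
--     for i in range(len(arr)-1, 0, -1):
--         val = arr[i]-arr[i-1]
--         if val > max_val:
--             max_val = val
--     return max_val
-- ===== SOURCE B (Python) =====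
-- def maxrange(arr):
--     best = 0
--     for x in arr:
--         succ = None
--         for y in arr:
--             if y > x and (succ is None or y < succ):
--                 succ = y
--         if succ is not None and succ - x > best:
--             best = succ - x
--     return best
-- ===== Notes on version B (the rewrite author's own statement) =====
-- stated objective: alternative
-- what changed: Replaced sort-then-adjacent-scan by a sort-free nearest-successor search: for every element find the smallest strictly larger element in the list and return the maximum such difference (0 if none).
import Mathlib
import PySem

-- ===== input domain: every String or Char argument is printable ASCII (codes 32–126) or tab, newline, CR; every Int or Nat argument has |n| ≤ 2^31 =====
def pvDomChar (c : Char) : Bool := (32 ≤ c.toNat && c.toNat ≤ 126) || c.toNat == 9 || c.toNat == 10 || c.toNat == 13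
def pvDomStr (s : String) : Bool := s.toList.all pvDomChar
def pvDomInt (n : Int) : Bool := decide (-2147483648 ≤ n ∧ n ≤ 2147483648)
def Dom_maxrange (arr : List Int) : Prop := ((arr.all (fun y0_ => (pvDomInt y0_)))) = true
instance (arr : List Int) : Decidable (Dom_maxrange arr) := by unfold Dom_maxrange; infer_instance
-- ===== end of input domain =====

-- B is sort-free: for every element it searches the list for the smallest strictly larger
-- element and returns the maximum such difference (alternative algorithm, same O(n^2) cost).
-- Note: A sorts its argument list in place; the equivalence proved here is about the return value.

-- ===== PORT A =====
-- one body of the inner loop: 'if arr[j] < arr[j-1]: swap'.  All call sites have 1 ≤ j < arr.length,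
-- so the getD defaults are never used and the `List.set` indices are in range (exact there).
def pvSwapStep (a : List Int) (j : Nat) : List Int :=
  let x := a.getD j 0
  let y := a.getD (j - 1) 0
  if x < y then (a.set j y).set (j - 1) x else a

-- 'for j in range(i, 0, -1)': j = i, i-1, …, 1
def pvBubbleJ : List Int → Nat → List Int
  | a, 0 => a
  | a, j + 1 => pvBubbleJ (pvSwapStep a (j + 1)) j

def pvSortarr (arr : List Int) : List Int :=
  (List.range arr.length).foldl (fun a i => pvBubbleJ a i) arr

-- 'for i in range(len(arr)-1, 0, -1)': i = len-1, …, 1 (empty when len ≤ 1, as in Python)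
def pvMaxLoop (s : List Int) : Nat → Int → Int
  | 0, mv => mv
  | i + 1, mv =>
      let val := s.getD (i + 1) 0 - s.getD i 0
      pvMaxLoop s i (if val > mv then val else mv)

def maxrange (arr : List Int) : Int :=
  let s := pvSortarr arr
  pvMaxLoop s (s.length - 1) 0

-- ===== PORT B =====
-- inner loop of Source B: 'succ = None; for y in arr: if y > x and (succ is None or y < succ): succ = y'
def pvSucc (x : Int) (arr : List Int) : Option Int :=
  arr.foldl (fun s y =>
    match s with
    | none => if x < y then some y else none
    | some m => if x < y ∧ y < m then some y else some m) none

def maxrange_alt (arr : List Int) : Int :=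
  arr.foldl (fun best x =>
    match pvSucc x arr with
    | none => best
    | some m => if m - x > best then m - x else best) 0

-- ===== PRECONDITION & SPEC =====
def Spec_maxrange (arr : List Int) (out : Int) : Prop := out = maxrange_alt arr
instance (arr : List Int) (out : Int) : Decidable (Spec_maxrange arr out) := by unfold Spec_maxrange; infer_instance

-- ===== CLAIM (what is proved, stated in full; the proofs are below) =====
def Claim_equal_maxrange : Prop := ∀ (arr : List Int), Dom_maxrange arr → Spec_maxrange arr (maxrange arr)

-- ===== LEMMAS AND PROOFS =====

-- ---- A side: the insertion sort sorts, the backwards loop is a fold of max over adjacent diffs ----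

theorem pv_getD_append_len {α : Type} (q u : List α) (k : Nat) (d : α) :
    (q ++ u).getD (q.length + k) d = u.getD k d := by
  induction q with
  | nil => simp
  | cons a q ih => simpa [Nat.succ_add] using ih

theorem pv_set_append_len {α : Type} (q u : List α) (k : Nat) (v : α) :
    (q ++ u).set (q.length + k) v = q ++ u.set k v := by
  induction q with
  | nil => simp
  | cons a q ih => simpa [Nat.succ_add] using ih

theorem pv_take_append_len {α : Type} (q u : List α) (k : Nat) :
    (q ++ u).take (q.length + k) = q ++ u.take k := by
  induction q with
  | nil => simp
  | cons a q ih => simpa [Nat.succ_add] using ih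

theorem pv_oi_append (x y : Int) (q : List Int) (h : x < y) :
    List.orderedInsert (· < ·) x (q ++ [y]) = List.orderedInsert (· < ·) x q ++ [y] := by
  induction q with
  | nil => simp [List.orderedInsert, h]
  | cons a q ih =>
      by_cases hxa : x < a <;> simp [List.orderedInsert, hxa, ih]

theorem pv_oi_last (x : Int) (q : List Int) (h : ∀ a ∈ q, ¬ x < a) :
    List.orderedInsert (· < ·) x q = q ++ [x] := by
  induction q with
  | nil => simp
  | cons a q ih =>
      have ha : ¬ x < a := h a (by simp)
      simp [List.orderedInsert, ha, ih (fun b hb => h b (by simp [hb]))]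

theorem pv_oi_pairwise (x : Int) (q : List Int) (h : q.Pairwise (· ≤ ·)) :
    (List.orderedInsert (· < ·) x q).Pairwise (· ≤ ·) := by
  induction q with
  | nil => simp
  | cons a q ih =>
      rcases List.pairwise_cons.mp h with ⟨ha, hq⟩
      by_cases hxa : x < a
      · rw [List.orderedInsert, if_pos hxa]
        refine List.pairwise_cons.mpr ⟨?_, h⟩
        intro b hb
        rcases List.mem_cons.mp hb with hb | hb
        · exact hb ▸ le_of_lt hxa
        · exact le_trans (le_of_lt hxa) (ha b hb)
      · rw [List.orderedInsert, if_neg hxa]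
        refine List.pairwise_cons.mpr ⟨?_, ih hq⟩
        intro b hb
        rcases (List.mem_orderedInsert _).mp hb with hb | hb
        · exact hb ▸ le_of_not_gt hxa
        · exact ha b hb

theorem pv_bubbleJ_noop (j : Nat) (a : List Int) (hj : j < a.length)
    (hs : (a.take (j + 1)).Pairwise (· ≤ ·)) : pvBubbleJ a j = a := by
  induction j generalizing a with
  | zero => rfl
  | succ j ih =>
      have hj1 : j + 1 < a.length := hj
      have hjlt : j < a.length := Nat.lt_of_succ_lt hj
      have hle : a[j] ≤ a[j + 1] := by
        have := List.pairwise_iff_getElem.mp hs j (j + 1)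
          (by simp [List.length_take]; omega) (by simp [List.length_take]; omega) (by omega)
        simpa [List.getElem_take] using this
      have hstep : pvSwapStep a (j + 1) = a := by
        simp only [pvSwapStep, List.getD_eq_getElem a 0 hj1, Nat.add_sub_cancel,
          List.getD_eq_getElem a 0 hjlt]
        rw [if_neg (not_lt.mpr hle)]
      rw [pvBubbleJ, hstep]
      refine ih a hjlt ?_
      have heq : a.take (j + 1) = (a.take (j + 1 + 1)).take (j + 1) := by
        rw [List.take_take]; congr 1; omega
      rw [heq]
      exact hs.sublist (List.take_sublist _ _)

theorem pv_bubbleJ_insert (p : List Int) (x : Int) (t : List Int)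
    (hp : p.Pairwise (· ≤ ·)) :
    pvBubbleJ (p ++ x :: t) p.length = List.orderedInsert (· < ·) x p ++ t := by
  induction p using List.reverseRecOn generalizing x t with
  | nil => simp [pvBubbleJ]
  | append_singleton q y ihq =>
      have hq : q.Pairwise (· ≤ ·) := (List.pairwise_append.mp hp).1
      have hqy : ∀ a ∈ q, a ≤ y := by
        intro a ha
        exact (List.pairwise_append.mp hp).2.2 a ha y (by simp)
      have hlen : (q ++ [y]).length = q.length + 1 := by simp
      have hrw : (q ++ [y]) ++ x :: t = q ++ y :: x :: t := by simp
      rw [hlen, hrw, pvBubbleJ]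
      have hgx : (q ++ y :: x :: t).getD (q.length + 1) 0 = x := by
        simpa using pv_getD_append_len q (y :: x :: t) 1 0
      have hgy : (q ++ y :: x :: t).getD q.length 0 = y := by
        simpa using pv_getD_append_len q (y :: x :: t) 0 0
      by_cases hxy : x < y
      · have hswap : pvSwapStep (q ++ y :: x :: t) (q.length + 1) = q ++ x :: y :: t := by
          simp only [pvSwapStep, hgx, Nat.add_sub_cancel, hgy]
          rw [if_pos hxy]
          have h1 : (q ++ y :: x :: t).set (q.length + 1) y = q ++ y :: y :: t := by
            simpa using pv_set_append_len q (y :: x :: t) 1 y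
          rw [h1]
          simpa using pv_set_append_len q (y :: y :: t) 0 x
        rw [hswap, ihq x (y :: t) hq, pv_oi_append x y q hxy]
        simp
      · have hnoswap : pvSwapStep (q ++ y :: x :: t) (q.length + 1) = q ++ y :: x :: t := by
          simp only [pvSwapStep, hgx, Nat.add_sub_cancel, hgy]
          rw [if_neg hxy]
        rw [hnoswap]
        have htake : (q ++ y :: x :: t).take (q.length + 1) = q ++ [y] := by
          simpa using pv_take_append_len q (y :: x :: t) 1
        have hnoop : pvBubbleJ (q ++ y :: x :: t) q.length = q ++ y :: x :: t := by
          refine pv_bubbleJ_noop q.length _ (by simp) ?_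
          rw [htake]; exact hp
        have hoi : List.orderedInsert (· < ·) x (q ++ [y]) = (q ++ [y]) ++ [x] := by
          refine pv_oi_last x (q ++ [y]) ?_
          intro a ha
          rcases List.mem_append.mp ha with ha | ha
          · exact not_lt.mpr (le_trans (hqy a ha) (le_of_not_gt hxy))
          · simp only [List.mem_singleton] at ha
            exact ha ▸ hxy
        rw [hnoop, hoi]
        simp

theorem pv_outer_inv (arr : List Int) : ∀ n, n ≤ arr.length →
    let s := (List.range n).foldl (fun a i => pvBubbleJ a i) arr
    s.Perm arr ∧ (s.take n).Pairwise (· ≤ ·) ∧ s.length = arr.length := by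
  intro n
  induction n with
  | zero => intro _; exact ⟨List.Perm.refl _, by simp, rfl⟩
  | succ n ih =>
      intro hn
      rcases ih (Nat.le_of_succ_le hn) with ⟨hperm, hsort, hlen⟩
      set s := (List.range n).foldl (fun a i => pvBubbleJ a i) arr with hs
      have hstep : (List.range (n + 1)).foldl (fun a i => pvBubbleJ a i) arr
          = pvBubbleJ s n := by
        rw [List.range_succ, List.foldl_append]; rfl
      have hnlt : n < s.length := by omega
      obtain ⟨x, hx⟩ : ∃ x, s[n]'hnlt = x := ⟨_, rfl⟩
      have hdecomp : s = s.take n ++ x :: s.drop (n + 1) := by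
        conv_lhs => rw [← List.take_append_drop n s]
        rw [← hx, List.getElem_cons_drop hnlt]
      have htlen : (s.take n).length = n := by simp; omega
      have hins : pvBubbleJ s n = List.orderedInsert (· < ·) x (s.take n) ++ s.drop (n + 1) := by
        have h := pv_bubbleJ_insert (s.take n) x (s.drop (n + 1)) hsort
        rw [htlen] at h
        conv_lhs => rw [hdecomp]
        exact h
      have hoilen : (List.orderedInsert (· < ·) x (s.take n)).length = n + 1 := by
        rw [List.orderedInsert_length]; omega
      rw [hstep, hins]
      refine ⟨?_, ?_, ?_⟩
      · have hsp : (s.take n ++ x :: s.drop (n + 1)).Perm s := by rw [← hdecomp]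
        refine ((List.perm_orderedInsert _ x (s.take n)).append_right _).trans ?_
        exact List.perm_middle.symm.trans (hsp.trans hperm)
      · rw [List.take_left' hoilen]
        exact pv_oi_pairwise _ _ hsort
      · simp only [List.length_append, hoilen, List.length_drop]; omega

theorem pv_sortarr_perm (arr : List Int) : (pvSortarr arr).Perm arr :=
  (pv_outer_inv arr arr.length (le_refl _)).1

theorem pv_sortarr_pairwise (arr : List Int) : (pvSortarr arr).Pairwise (· ≤ ·) := by
  obtain ⟨_, hsort, hlen⟩ := pv_outer_inv arr arr.length (le_refl _)
  rw [List.take_of_length_le (by omega)] at hsort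
  exact hsort

theorem pv_maxLoop_foldl (s : List Int) : ∀ (i : Nat) (mv : Int),
    pvMaxLoop s i mv =
      (((List.range i).map (fun k => s.getD (k + 1) 0 - s.getD k 0)).reverse).foldl
        (fun b v => if v > b then v else b) mv := by
  intro i
  induction i with
  | zero => intro mv; rfl
  | succ i ih =>
      intro mv
      rw [pvMaxLoop, List.range_succ]
      simp only [List.map_append, List.reverse_append, List.map_cons, List.map_nil,
        List.reverse_cons, List.reverse_nil, List.nil_append, List.cons_append,
        List.foldl_cons]
      exact ih _

theorem pv_range_map_eq_diffs (s : List Int) :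
    (List.range (s.length - 1)).map (fun k => s.getD (k + 1) 0 - s.getD k 0)
      = (s.zip (s.drop 1)).map (fun p => p.2 - p.1) := by
  apply List.ext_getElem
  · simp [List.length_zip]
  · intro i h1 h2
    have hi : i < s.length - 1 := by simpa using h1
    have hi1 : i + 1 < s.length := by omega
    have hi0 : i < s.length := by omega
    simp only [List.getElem_map, List.getElem_range, List.getElem_zip, List.getElem_drop,
      List.getD_eq_getElem s 0 hi1, List.getD_eq_getElem s 0 hi0]
    congr 1
    · congr 1; omega

theorem pv_foldl_rev (l : List Int) (b : Int) :
    l.reverse.foldl (fun b v => if v > b then v else b) b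
      = l.foldl (fun b v => if v > b then v else b) b := by
  refine @List.Perm.foldl_eq _ _ _ _ _ ⟨?_⟩ (List.reverse_perm l) b
  intro c x y
  dsimp only
  split_ifs <;> omega

-- A's value is the fold of max over the adjacent differences of its sorted list
theorem pv_maxrange_eq (arr : List Int) :
    maxrange arr = (((pvSortarr arr).zip ((pvSortarr arr).drop 1)).map
        (fun p => p.2 - p.1)).foldl (fun b v => if v > b then v else b) 0 := by
  unfold maxrange
  rw [pv_maxLoop_foldl, pv_foldl_rev, pv_range_map_eq_diffs]

-- ---- B side: the inner loop computes the minimum element strictly above x ----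

def pvIsSucc (x : Int) (l : List Int) (m : Int) : Prop :=
  m ∈ l ∧ x < m ∧ ∀ y ∈ l, x < y → m ≤ y

theorem pv_succ_none_gen (x : Int) (l : List Int) :
    l.foldl (fun s y =>
      match s with
      | none => if x < y then some y else none
      | some m => if x < y ∧ y < m then some y else some m) none = none
    ↔ ∀ y ∈ l, ¬ x < y := by
  induction l with
  | nil => simp
  | cons a l ih =>
      by_cases hxa : x < a
      · simp only [List.foldl_cons, if_pos hxa]
        constructor
        · intro h
          exfalso
          -- a fold starting from `some _` never returns none
          have : ∀ (t : List Int) (m : Int),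
              t.foldl (fun s y =>
                match s with
                | none => if x < y then some y else none
                | some m => if x < y ∧ y < m then some y else some m) (some m) ≠ none := by
            intro t
            induction t with
            | nil => simp
            | cons b t iht =>
                intro m
                simp only [List.foldl_cons]
                split_ifs <;> exact iht _
          exact this l a h
        · intro h; exact absurd hxa (h a (by simp))
      · simp only [List.foldl_cons, if_neg hxa]
        rw [ih]
        constructor
        · intro h y hy hxy
          rcases List.mem_cons.mp hy with rfl | hy
          · exact hxa hxy
          · exact h y hy hxy
        · intro h y hy hxy; exact h y (by simp [hy]) hxy

theorem pv_succ_some_gen (x : Int) (l : List Int) : ∀ (s0 : Option Int) (m : Int),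
    l.foldl (fun s y =>
      match s with
      | none => if x < y then some y else none
      | some m => if x < y ∧ y < m then some y else some m) s0 = some m →
    (s0 = some m ∨ (m ∈ l ∧ x < m)) ∧ (∀ y ∈ l, x < y → m ≤ y) ∧
      (∀ m0, s0 = some m0 → m ≤ m0) := by
  induction l with
  | nil => intro s0 m h; simp_all
  | cons a l ih =>
      intro s0 m h
      rw [List.foldl_cons] at h
      rcases s0 with _ | m0
      · dsimp only at h
        by_cases hxa : x < a
        · rw [if_pos hxa] at h
          obtain ⟨h1, h2, h3⟩ := ih _ m h
          refine ⟨Or.inr ?_, ?_, by simp⟩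
          · rcases h1 with h1 | h1
            · have ham : a = m := Option.some.inj h1
              exact ⟨ham ▸ List.mem_cons_self, ham ▸ hxa⟩
            · exact ⟨List.mem_cons_of_mem a h1.1, h1.2⟩
          · intro y hy hxy
            rcases List.mem_cons.mp hy with rfl | hy
            · exact h3 y rfl
            · exact h2 y hy hxy
        · rw [if_neg hxa] at h
          obtain ⟨h1, h2, h3⟩ := ih _ m h
          refine ⟨Or.inr ?_, ?_, by simp⟩
          · rcases h1 with h1 | h1
            · exact absurd h1 (by simp)
            · exact ⟨List.mem_cons_of_mem a h1.1, h1.2⟩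
          · intro y hy hxy
            rcases List.mem_cons.mp hy with rfl | hy
            · exact absurd hxy hxa
            · exact h2 y hy hxy
      · dsimp only at h
        by_cases hc : x < a ∧ a < m0
        · rw [if_pos hc] at h
          obtain ⟨h1, h2, h3⟩ := ih _ m h
          have hma : m ≤ a := h3 a rfl
          refine ⟨Or.inr ?_, ?_, ?_⟩
          · rcases h1 with h1 | h1
            · have ham : a = m := Option.some.inj h1
              exact ⟨ham ▸ List.mem_cons_self, ham ▸ hc.1⟩
            · exact ⟨List.mem_cons_of_mem a h1.1, h1.2⟩
          · intro y hy hxy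
            rcases List.mem_cons.mp hy with rfl | hy
            · exact hma
            · exact h2 y hy hxy
          · intro m1 hm1
            have : m0 = m1 := Option.some.inj hm1
            omega
        · rw [if_neg hc] at h
          obtain ⟨h1, h2, h3⟩ := ih _ m h
          have hmm0 : m ≤ m0 := h3 m0 rfl
          refine ⟨?_, ?_, ?_⟩
          · rcases h1 with h1 | h1
            · exact Or.inl h1
            · exact Or.inr ⟨List.mem_cons_of_mem a h1.1, h1.2⟩
          · intro y hy hxy
            rcases List.mem_cons.mp hy with rfl | hy
            · have : ¬ y < m0 := fun hlt => hc ⟨hxy, hlt⟩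
              omega
            · exact h2 y hy hxy
          · intro m1 hm1
            have : m0 = m1 := Option.some.inj hm1
            omega

theorem pv_succ_isSucc (x : Int) (l : List Int) (m : Int)
    (h : pvSucc x l = some m) : pvIsSucc x l m := by
  obtain ⟨h1, h2, _⟩ := pv_succ_some_gen x l none m h
  rcases h1 with h1 | h1
  · exact absurd h1 (by simp)
  · exact ⟨h1.1, h1.2, h2⟩

theorem pv_isSucc_unique (x : Int) (l : List Int) (m m' : Int)
    (h : pvIsSucc x l m) (h' : pvIsSucc x l m') : m = m' := by
  have h1 := h.2.2 m' h'.1 h'.2.1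
  have h2 := h'.2.2 m h.1 h.2.1
  omega

theorem pv_succ_eq_of_perm (x : Int) (l l' : List Int) (hp : l.Perm l') :
    pvSucc x l = pvSucc x l' := by
  rcases h : pvSucc x l with _ | m
  · rcases h' : pvSucc x l' with _ | m'
    · rfl
    · obtain ⟨hm, hxm, _⟩ := pv_succ_isSucc x l' m' h'
      have := (pv_succ_none_gen x l).mp h m' (hp.mem_iff.mpr hm)
      exact absurd hxm this
  · obtain ⟨hm, hxm, hmin⟩ := pv_succ_isSucc x l m h
    rcases h' : pvSucc x l' with _ | m'
    · have := (pv_succ_none_gen x l').mp h' m (hp.mem_iff.mp hm)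
      exact absurd hxm this
    · obtain ⟨hm', hxm', hmin'⟩ := pv_succ_isSucc x l' m' h'
      congr 1
      exact pv_isSucc_unique x l m m' ⟨hm, hxm, hmin⟩
        ⟨hp.mem_iff.mpr hm', hxm', fun y hy hxy => hmin' y (hp.mem_iff.mp hy) hxy⟩

-- ---- fold-of-max characterization ----

theorem pv_le_foldl_max (l : List Int) : ∀ b : Int, b ≤ l.foldl (fun b v => if v > b then v else b) b := by
  induction l with
  | nil => intro b; simp
  | cons a l ih =>
      intro b
      simp only [List.foldl_cons]
      have h1 : b ≤ if a > b then a else b := by split_ifs <;> omega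
      exact le_trans h1 (ih _)

theorem pv_mem_le_foldl_max (l : List Int) : ∀ (b v : Int), v ∈ l →
    v ≤ l.foldl (fun b v => if v > b then v else b) b := by
  induction l with
  | nil => intro _ _ h; simp at h
  | cons a l ih =>
      intro b v hv
      simp only [List.foldl_cons]
      rcases List.mem_cons.mp hv with rfl | hv
      · have h1 : v ≤ if v > b then v else b := by split_ifs <;> omega
        exact le_trans h1 (pv_le_foldl_max l _)
      · exact ih _ v hv

theorem pv_foldl_max_cases (l : List Int) : ∀ b : Int,
    l.foldl (fun b v => if v > b then v else b) b = b
      ∨ l.foldl (fun b v => if v > b then v else b) b ∈ l := by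
  induction l with
  | nil => intro b; simp
  | cons a l ih =>
      intro b
      simp only [List.foldl_cons]
      rcases ih (if a > b then a else b) with h | h
      · rw [h]
        split_ifs with hc
        · exact Or.inr (by simp)
        · exact Or.inl rfl
      · exact Or.inr (by simp [h])

-- ---- B's outer fold, reorganized ----

theorem pv_alt_step_comm (arr : List Int) (b x y : Int) :
    (fun best x =>
      match pvSucc x arr with
      | none => best
      | some m => if m - x > best then m - x else best)
      ((fun best x =>
        match pvSucc x arr with
        | none => best
        | some m => if m - x > best then m - x else best) b x) y
    = (fun best x =>
      match pvSucc x arr with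
      | none => best
      | some m => if m - x > best then m - x else best)
      ((fun best x =>
        match pvSucc x arr with
        | none => best
        | some m => if m - x > best then m - x else best) b y) x := by
  rcases hx : pvSucc x arr with _ | mx <;> rcases hy : pvSucc y arr with _ | my <;>
    simp only [hx, hy]
  generalize mx - x = u
  generalize my - y = v
  split_ifs <;> omega

-- fold over a filterMap: the None elements contribute nothing
theorem pv_alt_fold_filterMap (s : List Int) (l : List Int) : ∀ b : Int,
    l.foldl (fun best x =>
      match pvSucc x s with
      | none => best
      | some m => if m - x > best then m - x else best) b
    = (l.filterMap (fun x => (pvSucc x s).map (fun m => m - x))).foldl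
        (fun b v => if v > b then v else b) b := by
  induction l with
  | nil => intro b; rfl
  | cons a l ih =>
      intro b
      simp only [List.foldl_cons, List.filterMap_cons]
      rcases h : pvSucc a s with _ | m
      · simpa using ih b
      · simp only [Option.map_some, List.foldl_cons]
        exact ih _

-- monotone index access of a ≤-pairwise list
theorem pv_pairwise_getElem_mono (s : List Int) (hs : s.Pairwise (· ≤ ·))
    (i j : Nat) (hij : i ≤ j) (hj : j < s.length) : s[i]'(by omega) ≤ s[j] := by
  rcases Nat.lt_or_ge i j with h | h
  · exact List.pairwise_iff_getElem.mp hs i j (by omega) hj h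
  · have : i = j := by omega
    subst this; exact le_refl _

-- membership in the adjacent-differences list
theorem pv_mem_diffs (s : List Int) (v : Int) :
    v ∈ (s.zip (s.drop 1)).map (fun p => p.2 - p.1)
      ↔ ∃ i : Nat, ∃ h : i + 1 < s.length, v = s[i + 1] - s[i]'(by omega) := by
  constructor
  · intro hv
    obtain ⟨i, hi, hvi⟩ := List.mem_iff_getElem.mp hv
    have hil : i + 1 < s.length := by
      simp [List.length_zip] at hi
      omega
    refine ⟨i, hil, ?_⟩
    have hiz : i < (s.zip (s.drop 1)).length := by
      simp [List.length_zip]; omega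
    simp only [List.getElem_map, List.getElem_zip, List.getElem_drop] at hvi
    rw [← hvi]
    congr 1
    congr 1
    omega
  · rintro ⟨i, hil, rfl⟩
    apply List.mem_iff_getElem.mpr
    have hiz : i < ((s.zip (s.drop 1)).map (fun p => p.2 - p.1)).length := by
      simp [List.length_zip]; omega
    refine ⟨i, hiz, ?_⟩
    simp only [List.getElem_map, List.getElem_zip, List.getElem_drop]
    congr 1
    congr 1
    omega

-- each adjacent difference of the sorted list is bounded by B's fold result
theorem pv_diff_le_B (s : List Int)
    (hs : s.Pairwise (· ≤ ·)) (i : Nat) (hi : i + 1 < s.length) :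
    s[i + 1] - s[i]'(by omega)
      ≤ (s.filterMap (fun x => (pvSucc x s).map (fun m => m - x))).foldl
          (fun b v => if v > b then v else b) 0 := by
  by_cases hlt : s[i]'(by omega) < s[i + 1]
  · -- s[i+1] is the smallest element strictly above s[i]
    have hsucc : pvSucc (s[i]'(by omega)) s = some (s[i + 1]) := by
      rcases h : pvSucc (s[i]'(by omega)) s with _ | m
      · have := (pv_succ_none_gen _ s).mp h (s[i + 1]) (by simp)
        exact absurd hlt this
      · obtain ⟨hm, hxm, hmin⟩ := pv_succ_isSucc _ s m h
        congr 1
        refine pv_isSucc_unique _ s m (s[i + 1]) ⟨hm, hxm, hmin⟩ ⟨by simp, hlt, ?_⟩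
        intro y hy hxy
        obtain ⟨j, hj, rfl⟩ := List.mem_iff_getElem.mp hy
        have hij : i + 1 ≤ j := by
          by_contra hij
          have : s[j] ≤ s[i]'(by omega) :=
            pv_pairwise_getElem_mono s hs j i (by omega) (by omega)
          omega
        exact pv_pairwise_getElem_mono s hs (i + 1) j hij hj
    have hmem : s[i + 1] - s[i]'(by omega)
        ∈ s.filterMap (fun x => (pvSucc x s).map (fun m => m - x)) := by
      apply List.mem_filterMap.mpr
      exact ⟨s[i]'(by omega), by simp, by rw [hsucc]; rfl⟩
    exact pv_mem_le_foldl_max _ 0 _ hmem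
  · have h0 : s[i + 1] - s[i]'(by omega) ≤ 0 := by omega
    exact le_trans h0 (pv_le_foldl_max _ 0)

-- each successor gap is bounded by A's fold over adjacent differences
theorem pv_gap_le_A (s : List Int) (hs : s.Pairwise (· ≤ ·)) (x m : Int)
    (hx : x ∈ s) (hsucc : pvIsSucc x s m) :
    m - x ≤ ((s.zip (s.drop 1)).map (fun p => p.2 - p.1)).foldl
        (fun b v => if v > b then v else b) 0 := by
  obtain ⟨hm, hxm, hmin⟩ := hsucc
  obtain ⟨k, hk, hkm⟩ := List.mem_iff_getElem.mp hm
  obtain ⟨ix, hix, hixx⟩ := List.mem_iff_getElem.mp hx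
  -- j := least index with x < s[j]
  have hex : ∃ j : Nat, j < s.length ∧ x < s.getD j 0 :=
    ⟨k, hk, by rw [List.getD_eq_getElem s 0 hk, hkm]; exact hxm⟩
  have hjspec := Nat.find_spec hex
  set j := Nat.find hex with hjdef
  obtain ⟨hjlen, hjgt'⟩ := hjspec
  have hjgt : x < s[j] := by rwa [List.getD_eq_getElem s 0 hjlen] at hjgt'
  have hj0 : j ≠ 0 := by
    intro h0
    have h1 : s[0]'(by omega) ≤ s[ix] := pv_pairwise_getElem_mono s hs 0 ix (Nat.zero_le _) hix
    have h2 : x < s[0]'(by omega) := by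
      simp only [h0] at hjgt; exact hjgt
    omega
  have hj1 : j - 1 < s.length := by omega
  have hprev : ¬ x < s[j - 1] := by
    intro hlt
    have := Nat.find_min hex (m := j - 1) (by omega)
    rw [List.getD_eq_getElem s 0 hj1] at this
    exact this ⟨hj1, hlt⟩
  have hmsj : m ≤ s[j] := hmin _ (by simp) hjgt
  have hd : s[(j - 1) + 1] - s[j - 1] ∈ (s.zip (s.drop 1)).map (fun p => p.2 - p.1) := by
    apply (pv_mem_diffs s _).mpr
    exact ⟨j - 1, by omega, rfl⟩
  have hdv : s[(j - 1) + 1] = s[j] := by congr 1; omega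
  have hle : m - x ≤ s[(j - 1) + 1] - s[j - 1] := by
    rw [hdv]; omega
  exact le_trans hle (pv_mem_le_foldl_max _ 0 _ hd)

-- ===== VERDICT (by name: the statement is the Claim_ definition above) =====
theorem maxrange_spec : Claim_equal_maxrange := by
  intro arr _
  unfold Spec_maxrange
  set s := pvSortarr arr with hsdef
  have hperm : s.Perm arr := pv_sortarr_perm arr
  have hs : s.Pairwise (· ≤ ·) := pv_sortarr_pairwise arr
  -- rewrite B: fold over arr = fold over s, then inner pvSucc over arr = over s
  have hB1 : maxrange_alt arr
      = s.foldl (fun best x =>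
          match pvSucc x arr with
          | none => best
          | some m => if m - x > best then m - x else best) 0 := by
    unfold maxrange_alt
    refine (@List.Perm.foldl_eq _ _ _ _ _ ⟨?_⟩ (hperm : s.Perm arr) 0).symm
    intro c x y
    exact pv_alt_step_comm arr c x y
  have hB2 : s.foldl (fun best x =>
          match pvSucc x arr with
          | none => best
          | some m => if m - x > best then m - x else best) 0
      = s.foldl (fun best x =>
          match pvSucc x s with
          | none => best
          | some m => if m - x > best then m - x else best) 0 := by
    congr 1
    funext best x
    rw [pv_succ_eq_of_perm x arr s hperm.symm]
  rw [pv_maxrange_eq, hB1, hB2, pv_alt_fold_filterMap, ← hsdef]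
  -- antisymmetry between the two max-folds
  apply le_antisymm
  · rcases pv_foldl_max_cases ((s.zip (s.drop 1)).map (fun p => p.2 - p.1)) 0 with h | h
    · rw [h]; exact pv_le_foldl_max _ 0
    · obtain ⟨i, hi, hv⟩ := (pv_mem_diffs s _).mp h
      rw [hv]
      exact pv_diff_le_B s hs i hi
  · rcases pv_foldl_max_cases (s.filterMap (fun x => (pvSucc x s).map (fun m => m - x))) 0 with h | h
    · rw [h]; exact pv_le_foldl_max _ 0
    · obtain ⟨x, hx, hv⟩ := List.mem_filterMap.mp h
      rcases hsx : pvSucc x s with _ | m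
      · rw [hsx] at hv; simp at hv
      · rw [hsx] at hv
        simp only [Option.map_some, Option.some.injEq] at hv
        rw [← hv]
        exact pv_gap_le_A s hs x m hx (pv_succ_isSucc x s m hsx)
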